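-- pv_equiv track=rewrite | github.com/MathDEV-0/smellhunter-graph-similarity | main.py | clean_feature_type
-- ===== SOURCE A (Python) =====
-- def clean_feature_type(types):
--
--     if not types:
--         return "Unknown"
--
--     filtered = {
--         t for t in types
--         if not t.startswith("owl#")
--     }
--
--     if not filtered:
--         return "Unknown"
--
--     return sorted(filtered)[0]
-- ===== SOURCE B (Python) =====
-- def clean_feature_type(types):
--     best = None
--     for t in types:
--         if t.startswith("owl#"):
--             continue
--         if best is None or t < best:
--             best = t
--     return best if best is not None else "Unknown"
-- ===== Notes on version B (the rewrite author's own statement) =====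
-- stated objective: simpler
-- what changed: Replaced the set comprehension plus sorted()[0] with a single pass that tracks the running minimum non-owl# type, dropping both guards and the intermediate set.
import Mathlib
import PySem

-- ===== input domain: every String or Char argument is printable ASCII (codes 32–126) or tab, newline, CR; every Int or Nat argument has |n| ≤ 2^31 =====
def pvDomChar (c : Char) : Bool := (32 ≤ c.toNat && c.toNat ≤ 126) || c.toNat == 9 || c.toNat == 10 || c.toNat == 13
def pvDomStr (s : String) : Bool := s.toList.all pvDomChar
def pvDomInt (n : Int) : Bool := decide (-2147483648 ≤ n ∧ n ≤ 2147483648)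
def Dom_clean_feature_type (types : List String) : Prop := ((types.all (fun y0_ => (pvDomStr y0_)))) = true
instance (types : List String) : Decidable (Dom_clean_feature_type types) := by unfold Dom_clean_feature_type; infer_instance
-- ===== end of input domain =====

-- B replaces A's set comprehension + sorted()[0] with a single running-minimum pass (simpler, one traversal).


-- ===== PORT A =====
def clean_feature_type (types : List String) : String :=
  if types = [] then "Unknown"
  else
    let filtered : PySem.Set String :=
      PySem.Set.ofList (types.filter (fun t => !PySem.Str.startswith t "owl#"))
    if filtered = [] then "Unknown"
    else (PySem.List.sorted filtered (fun x => x) false).headD ""  -- [0] of a list guarded nonempty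

-- ===== PORT B =====
def clean_feature_type_alt (types : List String) : String :=
  (types.foldl
    (fun best t =>
      if PySem.Str.startswith t "owl#" then best
      else match best with
        | none => some t
        | some b => if t < b then some t else some b)
    none).getD "Unknown"

-- ===== PRECONDITION & SPEC =====
def Spec_clean_feature_type (types : List String) (out : String) : Prop := out = clean_feature_type_alt types
instance (types : List String) (out : String) : Decidable (Spec_clean_feature_type types out) := by unfold Spec_clean_feature_type; infer_instance

-- ===== CLAIM (what is proved, stated in full; the proofs are below) =====
def Claim_equal_clean_feature_type : Prop := ∀ (types : List String), Dom_clean_feature_type types → Spec_clean_feature_type types (clean_feature_type types)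

-- ===== LEMMAS AND PROOFS =====

-- the min-tracking step once the owl# test has been factored out
def pvMinStep (best : Option String) (t : String) : Option String :=
  match best with
  | none => some t
  | some b => if t < b then some t else some b

-- B's skip-and-min loop equals the min loop over the pre-filtered list.
theorem bstep_filter (l : List String) (acc : Option String) :
    l.foldl
      (fun best t =>
        if PySem.Str.startswith t "owl#" then best
        else match best with
          | none => some t
          | some b => if t < b then some t else some b)
      acc
    = (l.filter (fun t => !PySem.Str.startswith t "owl#")).foldl pvMinStep acc := by
  induction l generalizing acc with
  | nil => rfl
  | cons h t ih =>
    rw [List.foldl_cons, List.filter_cons]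
    by_cases hp : PySem.Str.startswith h "owl#" = true
    · rw [if_pos hp]
      simp only [hp, Bool.not_true, Bool.false_eq_true, if_false]
      exact ih acc
    · rw [if_neg hp]
      have hb : PySem.Str.startswith h "owl#" = false := by
        cases hq : PySem.Str.startswith h "owl#" <;> simp_all
      simp only [hb, Bool.not_false, if_true, List.foldl_cons]
      exact ih _

-- running-min loop from some b computes the fold of min
theorem bmin_some (l : List String) (b : String) :
    l.foldl pvMinStep (some b) = some (l.foldl min b) := by
  induction l generalizing b with
  | nil => rfl
  | cons h t ih =>
    rw [List.foldl_cons, List.foldl_cons]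
    show t.foldl pvMinStep (if h < b then some h else some b) = some (t.foldl min (min b h))
    by_cases h1 : h < b
    · rw [if_pos h1, min_eq_right h1.le, ih]
    · rw [if_neg h1, min_eq_left (not_lt.mp h1), ih]

theorem min_unique {m m' : String} {f : List String}
    (hm : m ∈ f) (hle : ∀ y ∈ f, m ≤ y)
    (hm' : m' ∈ f) (hle' : ∀ y ∈ f, m' ≤ y) : m = m' :=
  le_antisymm (hle m' hm') (hle' m hm)

-- A's guarded sorted-set head equals B's min fold, on any (already filtered) list f
theorem head_sorted_eq_fold (f : List String) :
    (if PySem.Set.ofList f = [] then "Unknown"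
     else (PySem.List.sorted (PySem.Set.ofList f) (fun x => x) false).headD "")
    = (f.foldl pvMinStep none).getD "Unknown" := by
  cases f with
  | nil => rfl
  | cons x t =>
    have hset : PySem.Set.ofList (x :: t) ≠ [] := by
      intro h
      have : x ∈ PySem.Set.ofList (x :: t) := by
        rw [PySem.Set.mem_ofList _ _]; exact List.mem_cons_self ..
      simp [h] at this
    rw [if_neg hset, List.foldl_cons]
    show _ = (t.foldl pvMinStep (some x)).getD "Unknown"
    rw [bmin_some, Option.getD_some]
    rcases hs : PySem.List.sorted (PySem.Set.ofList (x :: t)) (fun x => x) false with _ | ⟨m, s⟩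
    · exact absurd (((PySem.List.sorted_eq_nil_iff _ _ _).mp hs)) hset
    · have hmem : m ∈ x :: t := by
        have : m ∈ PySem.List.sorted (PySem.Set.ofList (x :: t)) (fun x => x) false := by
          rw [hs]; exact List.mem_cons_self ..
        rw [PySem.List.mem_sorted, PySem.Set.mem_ofList _ _] at this
        exact this
      have hle : ∀ y ∈ x :: t, m ≤ y := fun y hy =>
        PySem.List.key_head_sorted_le _ _ hs y ((PySem.Set.mem_ofList _ _).mpr hy)
      have hmin : PySem.List.min? (x :: t) (fun y => y) = some (t.foldl min x) :=
        PySem.List.min?_id_cons ..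
      have hmem' : t.foldl min x ∈ x :: t := PySem.List.min?_mem hmin
      have hle' : ∀ y ∈ x :: t, t.foldl min x ≤ y := fun y hy =>
        PySem.List.min?_isMin hmin y hy
      simpa using min_unique hmem hle hmem' hle'

-- ===== VERDICT (by name: the statement is the Claim_ definition above) =====
theorem clean_feature_type_spec : Claim_equal_clean_feature_type := by
  intro types _
  unfold Spec_clean_feature_type clean_feature_type clean_feature_type_alt
  rw [bstep_filter]
  by_cases hnil : types = []
  · subst hnil; rfl
  · rw [if_neg hnil]
    exact head_sorted_eq_fold _
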